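-- pv_equiv track=rewrite | github.com/sriasapu/TheRock | build_tools/github_actions/github_actions_utils.py | find_matching_gpu_arch
-- ===== SOURCE A (Python) =====
-- def find_matching_gpu_arch(gpu_arch: str, available_gpu_archs: set[str]) -> str | None:
--     """
--     Find the most specific GPU architecture in the set that matches the given GPU.
--
--     Tries in order from most specific to least specific:
--     # Example:
--     # find_matching_gpu_arch('gfx1151', {'gfx1151', 'gfx115X', 'gfx11X'}) gives 'gfx1151'
--     # find_matching_gpu_arch('gfx1151', {'gfx1150', 'gfx94X', 'gfx11X'}) gives 'gfx11X'
--     - Wildcard matches (gfx115X, gfx11X, etc.)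
--
--     Returns the matching architecture string or None if no match found.
--     """
--     # First, try exact match
--     if gpu_arch in available_gpu_archs:
--         return gpu_arch
--
--     # Generate possible wildcard patterns from most specific to least specific
--     # For gfx1151: try gfx115X, gfx11X
--     possible_patterns = []
--     arch_str = gpu_arch
--
--     # Generate patterns by replacing characters with X from right to left
--     for i in range(len(arch_str) - 1, 1, -1):
--         pattern = arch_str[:i] + "X"
--         possible_patterns.append(pattern)
--
--     # Try each pattern
--     for pattern in possible_patterns:
--         if pattern in available_gpu_archs:
--             return pattern
--
--     return None
-- ===== SOURCE B (Python) =====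
-- def find_matching_gpu_arch(gpu_arch: str, available_gpu_archs: set[str]) -> str | None:
--     """Single scan over the available archs keeping the best (highest-score) match.
--
--     A candidate c matches exactly (score len(gpu_arch)+1) or as a wildcard
--     pattern c = gpu_arch[:i] + 'X' with 2 <= i <= len(gpu_arch) - 1 (score len(c)).
--     The longest match (exact match beats everything) is the most specific one.
--     """
--     n = len(gpu_arch)
--     best = None
--     best_score = 0
--     for c in available_gpu_archs:
--         if c == gpu_arch:
--             score = n + 1
--         elif c.endswith("X") and gpu_arch.startswith(c[:-1]) and 2 <= len(c) - 1 <= n - 1: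
--             score = len(c)
--         else:
--             score = 0
--         if score > best_score:
--             best, best_score = c, score
--     return best
-- ===== Notes on version B (the rewrite author's own statement) =====
-- stated objective: faster
-- what changed: Instead of generating all wildcard patterns from gpu_arch (quadratic string building) and probing the set for each, B makes one pass over available_gpu_archs, scoring each candidate in place (exact match or wildcard with prefix window 2..len-1) and keeping the highest-scoring match; the per-score match is unique, so the scan is order-independent.
import Mathlib
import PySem

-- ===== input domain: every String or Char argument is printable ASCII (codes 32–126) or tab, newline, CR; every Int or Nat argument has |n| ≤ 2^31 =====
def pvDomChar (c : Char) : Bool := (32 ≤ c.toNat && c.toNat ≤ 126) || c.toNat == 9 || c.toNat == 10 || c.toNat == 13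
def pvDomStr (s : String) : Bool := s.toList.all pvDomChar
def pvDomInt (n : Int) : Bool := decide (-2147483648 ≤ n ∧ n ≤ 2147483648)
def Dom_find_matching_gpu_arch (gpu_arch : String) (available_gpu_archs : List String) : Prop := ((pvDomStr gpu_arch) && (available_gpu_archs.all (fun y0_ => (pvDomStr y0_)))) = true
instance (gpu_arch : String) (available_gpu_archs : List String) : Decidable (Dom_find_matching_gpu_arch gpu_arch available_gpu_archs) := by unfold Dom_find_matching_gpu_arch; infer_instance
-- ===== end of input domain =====

-- B replaces A's generate-patterns-then-probe search by a single scoring scan over the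
-- available archs keeping the best match; strings are handled as code-point lists (PySem.Chars).

-- ===== PORT A =====
-- possible_patterns = []; for i in range(len(arch_str)-1, 1, -1): possible_patterns.append(arch_str[:i] + "X")
def pvPatternsA (arch : List Char) : List (List Char) :=
  (PySem.List.pyRange ((arch.length : Int) - 1) 1 (-1)).foldl
    (fun acc i => acc ++ [PySem.Chars.slice arch none (some i) ++ ['X']]) []

-- for pattern in possible_patterns: if pattern in available_gpu_archs: return pattern
def pvFirstInA (avail : List (List Char)) : List (List Char) → Option (List Char)
  | [] => none
  | p :: rest => if avail.contains p then some p else pvFirstInA avail rest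

def pvFindA (g : List Char) (avail : List (List Char)) : Option (List Char) :=
  if avail.contains g then some g
  else pvFirstInA avail (pvPatternsA g)

def find_matching_gpu_arch (gpu_arch : String) (available_gpu_archs : List String) : Option String :=
  (pvFindA gpu_arch.toList (available_gpu_archs.map String.toList)).map String.ofList

-- ===== PORT B =====
-- score of candidate c: n+1 for the exact match, len(c) for a wildcard match, else 0
def pvScoreB (g c : List Char) : Nat :=
  if c = g then g.length + 1
  else if PySem.Chars.endswith c ['X']
        && PySem.Chars.startswith g (PySem.Chars.slice c none (some (-1)))
        && decide (2 ≤ (c.length : Int) - 1 ∧ (c.length : Int) - 1 ≤ (g.length : Int) - 1)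
       then c.length else 0

-- best = None; best_score = 0; for c in available: if score > best_score: best, best_score = c, score
def pvFindB (g : List Char) (avail : List (List Char)) : Option (List Char) :=
  (avail.foldl
    (fun (st : Option (List Char) × Nat) c =>
      let sc := pvScoreB g c
      if st.2 < sc then (some c, sc) else st)
    (none, 0)).1

def find_matching_gpu_arch_alt (gpu_arch : String) (available_gpu_archs : List String) : Option String :=
  (pvFindB gpu_arch.toList (available_gpu_archs.map String.toList)).map String.ofList

-- ===== PRECONDITION & SPEC =====
def Spec_find_matching_gpu_arch (gpu_arch : String) (available_gpu_archs : List String) (out : Option String) : Prop := out = find_matching_gpu_arch_alt gpu_arch available_gpu_archs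
instance (gpu_arch : String) (available_gpu_archs : List String) (out : Option String) : Decidable (Spec_find_matching_gpu_arch gpu_arch available_gpu_archs out) := by unfold Spec_find_matching_gpu_arch; infer_instance

-- ===== CLAIM (what is proved, stated in full; the proofs are below) =====
def Claim_equal_find_matching_gpu_arch : Prop := ∀ (gpu_arch : String) (available_gpu_archs : List String), Dom_find_matching_gpu_arch gpu_arch available_gpu_archs → Spec_find_matching_gpu_arch gpu_arch available_gpu_archs (find_matching_gpu_arch gpu_arch available_gpu_archs)

-- ===== LEMMAS AND PROOFS =====

-- "r is a best match": none when nothing matches, else a match of maximal score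
def pvBest (g : List Char) (S : List (List Char)) (r : Option (List Char)) : Prop :=
  (r = none ∧ ∀ c ∈ S, pvScoreB g c = 0) ∨
  (∃ m, r = some m ∧ m ∈ S ∧ 0 < pvScoreB g m ∧ ∀ c ∈ S, pvScoreB g c ≤ pvScoreB g m)

lemma pvScoreB_self (g : List Char) : pvScoreB g g = g.length + 1 := by
  simp [pvScoreB]

lemma pvScoreB_le (g c : List Char) : pvScoreB g c ≤ g.length + 1 := by
  unfold pvScoreB
  split_ifs with h1 h2
  · omega
  · simp only [Bool.and_eq_true, decide_eq_true_eq] at h2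
    omega
  · omega

lemma pvScoreB_spec (g c : List Char) (h : 0 < pvScoreB g c) :
    (c = g ∧ pvScoreB g c = g.length + 1) ∨
    (c ≠ g ∧ ∃ i : Nat, 2 ≤ i ∧ (i : Int) ≤ (g.length : Int) - 1 ∧
      c = g.take i ++ ['X'] ∧ pvScoreB g c = i + 1) := by
  unfold pvScoreB at h ⊢
  split_ifs at h ⊢ with h1 h2
  · exact Or.inl ⟨h1, rfl⟩
  · simp only [Bool.and_eq_true, decide_eq_true_eq] at h2
    obtain ⟨⟨hend, hstart⟩, hwin⟩ := h2
    rw [PySem.Chars.endswith_iff] at hend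
    obtain ⟨t, ht⟩ := hend
    rw [PySem.Chars.startswith_iff] at hstart
    rw [PySem.Chars.slice_eq_listSlice, PySem.List.slice_to_neg_one] at hstart
    refine Or.inr ⟨h1, c.length - 1, ?_, ?_, ?_, ?_⟩
    · omega
    · omega
    · have hdl : c.dropLast = t := by rw [← ht]; exact List.dropLast_concat
      have hpre : t <+: g := hdl ▸ hstart
      have h2 : (t ++ ['X']).length - 1 = t.length := by simp
      rw [← ht, h2, ← (List.prefix_iff_eq_take).mp hpre]
    · have := congrArg List.length ht
      simp at this; omega
  · omega

lemma pvScoreB_pattern (g : List Char) (i : Nat) (h2 : 2 ≤ i) (hn : (i : Int) ≤ (g.length : Int) - 1) :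
    0 < pvScoreB g (g.take i ++ ['X']) ∧
    (g.take i ++ ['X'] ≠ g → pvScoreB g (g.take i ++ ['X']) = i + 1) := by
  have hilt : i < g.length := by omega
  have hlen : (g.take i ++ ['X']).length = i + 1 := by
    simp [List.length_take]; omega
  unfold pvScoreB
  split_ifs with h1 hc
  · exact ⟨by omega, fun hne => absurd h1 hne⟩
  · refine ⟨by omega, fun _ => by omega⟩
  · exfalso; apply hc
    simp only [Bool.and_eq_true, decide_eq_true_eq]
    refine ⟨⟨?_, ?_⟩, ?_⟩
    · rw [PySem.Chars.endswith_iff]; exact ⟨g.take i, rfl⟩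
    · rw [PySem.Chars.startswith_iff, PySem.Chars.slice_eq_listSlice, PySem.List.slice_to_neg_one,
        List.dropLast_concat]
      exact List.take_prefix i g
    · rw [hlen]; push_cast; omega

lemma pvScoreB_inj (g c1 c2 : List Char) (h1 : 0 < pvScoreB g c1)
    (heq : pvScoreB g c1 = pvScoreB g c2) : c1 = c2 := by
  have h2 : 0 < pvScoreB g c2 := heq ▸ h1
  rcases pvScoreB_spec g c1 h1 with ⟨e1, v1⟩ | ⟨ne1, i1, hi1, hn1, hc1, v1⟩ <;>
    rcases pvScoreB_spec g c2 h2 with ⟨e2, v2⟩ | ⟨ne2, i2, hi2, hn2, hc2, v2⟩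
  · rw [e1, e2]
  · exfalso; rw [v1, v2] at heq; omega
  · exfalso; rw [v1, v2] at heq; omega
  · have : i1 = i2 := by rw [v1, v2] at heq; omega
    rw [hc1, hc2, this]

lemma pvPatternsA_eq (g : List Char) :
    pvPatternsA g = (PySem.List.pyRange ((g.length : Int) - 1) 1 (-1)).map
      (fun i => g.take i.toNat ++ ['X']) := by
  unfold pvPatternsA
  rw [PySem.List.foldl_append_singleton_eq_map]
  simp only [List.nil_append]
  apply List.map_congr_left
  intro i hi
  rw [PySem.List.mem_pyRange_neg_one] at hi
  rw [PySem.Chars.slice_eq_listSlice, PySem.List.slice_to g (by omega : (0:Int) ≤ i)]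

lemma mem_pvPatternsA (g c : List Char) :
    c ∈ pvPatternsA g ↔ ∃ i : Nat, 2 ≤ i ∧ (i : Int) ≤ (g.length : Int) - 1 ∧
      c = g.take i ++ ['X'] := by
  rw [pvPatternsA_eq]
  simp only [List.mem_map, PySem.List.mem_pyRange_neg_one]
  constructor
  · rintro ⟨i, ⟨hgt, hle⟩, rfl⟩
    exact ⟨i.toNat, by omega, by omega, rfl⟩
  · rintro ⟨i, h2, hn, rfl⟩
    exact ⟨(i : Int), ⟨by omega, by omega⟩, by simp⟩

lemma pvPatternsA_pairwise (g : List Char) :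
    (pvPatternsA g).Pairwise (fun p q => pvScoreB g q < pvScoreB g p) := by
  rw [pvPatternsA_eq]
  have hr : (PySem.List.pyRange ((g.length : Int) - 1) 1 (-1)).Pairwise (fun a b => b < a) := by
    rw [PySem.List.pyRange_neg_one_eq_reverse]
    rw [List.pairwise_reverse]
    exact PySem.List.pairwise_lt_pyRange_one _ _
  rw [List.pairwise_map]
  refine List.Pairwise.imp_of_mem ?_ hr
  intro a b ha hb hlt
  rw [PySem.List.mem_pyRange_neg_one] at ha hb
  -- 1 < b < a ≤ len g - 1 : the later (shorter) pattern scores strictly less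
  have hb2 : 2 ≤ b.toNat := by omega
  have hbn : (b.toNat : Int) ≤ (g.length : Int) - 1 := by omega
  have ha2 : 2 ≤ a.toNat := by omega
  have han : (a.toNat : Int) ≤ (g.length : Int) - 1 := by omega
  have hbne : g.take b.toNat ++ ['X'] ≠ g := by
    intro h
    have := congrArg List.length h
    simp [List.length_take] at this
    omega
  have hbval := (pvScoreB_pattern g b.toNat hb2 hbn).2 hbne
  by_cases hae : g.take a.toNat ++ ['X'] = g
  · rw [hae, pvScoreB_self, hbval]; omega
  · rw [(pvScoreB_pattern g a.toNat ha2 han).2 hae, hbval]; omega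

lemma pvScoreB_pos_cases (g c : List Char) (h : 0 < pvScoreB g c) :
    c = g ∨ c ∈ pvPatternsA g := by
  rcases pvScoreB_spec g c h with ⟨e, _⟩ | ⟨_, i, h2, hn, hc, _⟩
  · exact Or.inl e
  · exact Or.inr ((mem_pvPatternsA g c).mpr ⟨i, h2, hn, hc⟩)

lemma pvPatternsA_pos (g c : List Char) (h : c ∈ pvPatternsA g) : 0 < pvScoreB g c := by
  obtain ⟨i, h2, hn, rfl⟩ := (mem_pvPatternsA g c).mp h
  exact (pvScoreB_pattern g i h2 hn).1

lemma pvFirstInA_spec (g : List Char) (avail : List (List Char)) (pats : List (List Char))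
    (hp : pats.Pairwise (fun p q => pvScoreB g q < pvScoreB g p)) :
    (pvFirstInA avail pats = none ∧ ∀ p ∈ pats, p ∉ avail) ∨
    (∃ m, pvFirstInA avail pats = some m ∧ m ∈ avail ∧ m ∈ pats ∧
      ∀ p ∈ pats, p ∈ avail → pvScoreB g p ≤ pvScoreB g m) := by
  induction pats with
  | nil => exact Or.inl ⟨rfl, by simp⟩
  | cons p rest ih =>
    rw [List.pairwise_cons] at hp
    obtain ⟨hhead, htail⟩ := hp
    by_cases hm : p ∈ avail
    · refine Or.inr ⟨p, ?_, hm, List.mem_cons_self, ?_⟩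
      · simp [pvFirstInA, hm]
      · intro q hq _
        rcases List.mem_cons.mp hq with rfl | hq'
        · exact le_refl _
        · exact le_of_lt (hhead q hq')
    · rcases ih htail with ⟨hnone, hall⟩ | ⟨m, hsome, hmem, hmp, hmax⟩
      · refine Or.inl ⟨?_, ?_⟩
        · simp [pvFirstInA, hm, hnone]
        · intro q hq
          rcases List.mem_cons.mp hq with rfl | hq'
          · exact hm
          · exact hall q hq'
      · refine Or.inr ⟨m, ?_, hmem, List.mem_cons_of_mem p hmp, ?_⟩
        · simp [pvFirstInA, hm, hsome]
        · intro q hq hqa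
          rcases List.mem_cons.mp hq with rfl | hq'
          · exact absurd hqa hm
          · exact hmax q hq' hqa

lemma pvFoldB_spec (g : List Char) (l : List (List Char)) (b : Option (List Char)) (s : Nat) :
    (l.foldl (fun (st : Option (List Char) × Nat) c =>
        let sc := pvScoreB g c
        if st.2 < sc then (some c, sc) else st) (b, s) = (b, s) ∧
      ∀ c ∈ l, pvScoreB g c ≤ s) ∨
    (∃ m, l.foldl (fun (st : Option (List Char) × Nat) c =>
        let sc := pvScoreB g c
        if st.2 < sc then (some c, sc) else st) (b, s) = (some m, pvScoreB g m) ∧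
      m ∈ l ∧ s < pvScoreB g m ∧ ∀ c ∈ l, pvScoreB g c ≤ pvScoreB g m) := by
  induction l generalizing b s with
  | nil => exact Or.inl ⟨rfl, by simp⟩
  | cons c t ih =>
    simp only [List.foldl_cons]
    by_cases hc : s < pvScoreB g c
    · simp only [hc, if_pos]
      rcases ih (some c) (pvScoreB g c) with ⟨heq, hall⟩ | ⟨m, heq, hmem, hlt, hall⟩
      · refine Or.inr ⟨c, heq, List.mem_cons_self, hc, ?_⟩
        intro d hd
        rcases List.mem_cons.mp hd with rfl | hd'
        · exact le_refl _
        · exact hall d hd'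
      · refine Or.inr ⟨m, heq, List.mem_cons_of_mem c hmem, lt_trans hc hlt, ?_⟩
        intro d hd
        rcases List.mem_cons.mp hd with rfl | hd'
        · exact le_of_lt hlt
        · exact hall d hd'
    · simp only [hc, if_neg, not_false_iff]
      rcases ih b s with ⟨heq, hall⟩ | ⟨m, heq, hmem, hlt, hall⟩
      · refine Or.inl ⟨heq, ?_⟩
        intro d hd
        rcases List.mem_cons.mp hd with rfl | hd'
        · omega
        · exact hall d hd'
      · refine Or.inr ⟨m, heq, List.mem_cons_of_mem c hmem, hlt, ?_⟩
        intro d hd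
        rcases List.mem_cons.mp hd with rfl | hd'
        · omega
        · exact hall d hd'

lemma pvFindA_best (g : List Char) (S : List (List Char)) : pvBest g S (pvFindA g S) := by
  unfold pvFindA
  by_cases hg : S.contains g
  · rw [if_pos hg]
    refine Or.inr ⟨g, rfl, ?_, ?_, ?_⟩
    · simpa using hg
    · rw [pvScoreB_self]; omega
    · intro c _; rw [pvScoreB_self]; exact pvScoreB_le g c
  · rw [if_neg hg]
    have hgS : g ∉ S := by simpa using hg
    rcases pvFirstInA_spec g S (pvPatternsA g) (pvPatternsA_pairwise g) with
      ⟨hnone, hall⟩ | ⟨m, hsome, hmem, hmp, hmax⟩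
    · refine Or.inl ⟨hnone, ?_⟩
      intro c hc
      by_contra hne
      rcases pvScoreB_pos_cases g c (by omega) with rfl | hp
      · exact hgS hc
      · exact hall c hp hc
    · refine Or.inr ⟨m, hsome, hmem, pvPatternsA_pos g m hmp, ?_⟩
      intro c hc
      by_cases hpos : 0 < pvScoreB g c
      · rcases pvScoreB_pos_cases g c hpos with rfl | hp
        · exact absurd hc hgS
        · exact hmax c hp hc
      · omega

lemma pvFindB_best (g : List Char) (S : List (List Char)) : pvBest g S (pvFindB g S) := by
  unfold pvFindB
  rcases pvFoldB_spec g S none 0 with ⟨heq, hall⟩ | ⟨m, heq, hmem, hlt, hall⟩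
  · rw [heq]
    exact Or.inl ⟨rfl, fun c hc => by have := hall c hc; omega⟩
  · rw [heq]
    exact Or.inr ⟨m, rfl, hmem, hlt, hall⟩

lemma pvBest_unique (g : List Char) (S : List (List Char)) (r1 r2 : Option (List Char))
    (h1 : pvBest g S r1) (h2 : pvBest g S r2) : r1 = r2 := by
  rcases h1 with ⟨e1, z1⟩ | ⟨m1, e1, hm1, hp1, hx1⟩ <;>
    rcases h2 with ⟨e2, z2⟩ | ⟨m2, e2, hm2, hp2, hx2⟩
  · rw [e1, e2]
  · exfalso; have := z1 m2 hm2; omega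
  · exfalso; have := z2 m1 hm1; omega
  · rw [e1, e2]
    have hle1 := hx1 m2 hm2
    have hle2 := hx2 m1 hm1
    have : pvScoreB g m1 = pvScoreB g m2 := le_antisymm hle2 hle1
    rw [pvScoreB_inj g m1 m2 hp1 this]

-- ===== VERDICT (by name: the statement is the Claim_ definition above) =====
theorem find_matching_gpu_arch_spec : Claim_equal_find_matching_gpu_arch := by
  intro gpu_arch available_gpu_archs _
  unfold Spec_find_matching_gpu_arch find_matching_gpu_arch find_matching_gpu_arch_alt
  rw [pvBest_unique gpu_arch.toList (available_gpu_archs.map String.toList) _ _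
    (pvFindA_best _ _) (pvFindB_best _ _)]
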